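-- pv_equiv track=rewrite | github.com/artonson/def | sharpf/utils/abc_utils.py | get_adjacent_features_by_bfs_with_depth1
-- ===== SOURCE A (Python) =====
-- from collections import defaultdict
-- from copy import deepcopy
--
-- def get_adjacent_features_by_bfs_with_depth1(surface_idx, adjacent_sharp_features, adjacent_surfaces):
--     """If adjacent sharp curves exist, return one of them.
--     If not, return ones adjacent to adjacent surfaces. """
--
--     adjacent_sharp_indexes = deepcopy(adjacent_sharp_features[surface_idx])
--
--     # if not adjacent_sharp_indexes:
--     #     adjacent_sharp_indexes = []
--     #
--     for adjacent_surface_idx in adjacent_surfaces[surface_idx]: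
--         adjacent_surface_adjacent_sharp_features = \
--             {adjacent_surface_idx: adjacent_sharp_features[adjacent_surface_idx]}
--
--         adjacent_surface_adjacent_sharp_indexes = \
--             get_adjacent_features_by_bfs_with_depth1(
--                 adjacent_surface_idx, adjacent_surface_adjacent_sharp_features,
--                 defaultdict(list))
--
--         adjacent_sharp_indexes.extend(adjacent_surface_adjacent_sharp_indexes)
--
--     return adjacent_sharp_indexes
-- ===== SOURCE B (Python) =====
-- def get_adjacent_features_by_bfs_with_depth1(surface_idx, adjacent_sharp_features, adjacent_surfaces):
--     """If adjacent sharp curves exist, return one of them.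
--     If not, return ones adjacent to adjacent surfaces. """
--     return [feature
--             for idx in (surface_idx, *adjacent_surfaces[surface_idx])
--             for feature in adjacent_sharp_features[idx]]
-- ===== Notes on version B (the rewrite author's own statement) =====
-- stated objective: simpler
-- what changed: A's depth-1 self-recursion that rebuilds a singleton dict and an empty defaultdict for every neighbour is replaced by one flat comprehension over [surface_idx] + its adjacent surfaces.
import Mathlib
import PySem

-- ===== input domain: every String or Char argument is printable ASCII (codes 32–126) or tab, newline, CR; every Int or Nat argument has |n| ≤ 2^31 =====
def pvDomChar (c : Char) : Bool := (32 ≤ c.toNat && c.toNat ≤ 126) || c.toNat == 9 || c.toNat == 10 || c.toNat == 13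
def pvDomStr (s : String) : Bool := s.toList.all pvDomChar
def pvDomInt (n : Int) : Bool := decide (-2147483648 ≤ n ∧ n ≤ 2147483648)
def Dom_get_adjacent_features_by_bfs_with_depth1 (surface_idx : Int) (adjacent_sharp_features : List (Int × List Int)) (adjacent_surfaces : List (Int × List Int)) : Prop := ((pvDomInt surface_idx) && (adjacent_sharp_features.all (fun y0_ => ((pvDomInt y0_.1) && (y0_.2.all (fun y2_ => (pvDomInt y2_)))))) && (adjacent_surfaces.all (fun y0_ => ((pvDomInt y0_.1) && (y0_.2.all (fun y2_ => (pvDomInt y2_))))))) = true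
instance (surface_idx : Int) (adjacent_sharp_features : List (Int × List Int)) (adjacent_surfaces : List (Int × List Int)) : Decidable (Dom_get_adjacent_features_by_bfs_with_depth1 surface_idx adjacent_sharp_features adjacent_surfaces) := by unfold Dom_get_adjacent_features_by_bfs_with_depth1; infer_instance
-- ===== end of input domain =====

-- B replaces A's depth-1 self-recursion (with its per-neighbour singleton-dict reconstruction)
-- by one flat comprehension over [surface_idx] ++ neighbours — simpler, same result.

-- ===== PORT A =====
-- The Python recursion has depth ≤ 2 (every recursive call passes an empty surfaces dict,
-- so its loop is empty); the Nat fuel is purely a termination guard, never exhausted (fuel 2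
-- at the top call suffices). Dict lookups d[k] are List.lookup (first match); the case where
-- Python would raise KeyError (lookup = none) is excluded by Pre_ and totalised with getD [];
-- the inner call's defaultdict(list) is the empty association list, where getD [] is exact.
def pvARec : Nat → Int → List (Int × List Int) → List (Int × List Int) → List Int
  | 0, _, _, _ => []
  | fuel+1, surface_idx, adjacent_sharp_features, adjacent_surfaces =>
    let adjacent_sharp_indexes := (adjacent_sharp_features.lookup surface_idx).getD []
    ((adjacent_surfaces.lookup surface_idx).getD []).foldl
      (fun acc adjacent_surface_idx =>
        acc ++ pvARec fuel adjacent_surface_idx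
                [(adjacent_surface_idx, (adjacent_sharp_features.lookup adjacent_surface_idx).getD [])]
                [])
      adjacent_sharp_indexes

def get_adjacent_features_by_bfs_with_depth1 (surface_idx : Int) (adjacent_sharp_features : List (Int × List Int)) (adjacent_surfaces : List (Int × List Int)) : List Int :=
  pvARec 2 surface_idx adjacent_sharp_features adjacent_surfaces

-- ===== PORT B =====
def get_adjacent_features_by_bfs_with_depth1_alt (surface_idx : Int) (adjacent_sharp_features : List (Int × List Int)) (adjacent_surfaces : List (Int × List Int)) : List Int :=
  (surface_idx :: (adjacent_surfaces.lookup surface_idx).getD []).flatMap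
    (fun idx => (adjacent_sharp_features.lookup idx).getD [])

-- ===== PRECONDITION & SPEC =====
-- Pre_ excludes exactly the inputs where the Python A raises KeyError: surface_idx missing
-- from either dict, or a listed neighbour missing from adjacent_sharp_features.
def Pre_get_adjacent_features_by_bfs_with_depth1 (surface_idx : Int) (adjacent_sharp_features : List (Int × List Int)) (adjacent_surfaces : List (Int × List Int)) : Prop :=
  (adjacent_sharp_features.lookup surface_idx).isSome = true ∧
  (adjacent_surfaces.lookup surface_idx).isSome = true ∧
  ∀ n ∈ (adjacent_surfaces.lookup surface_idx).getD [],
    (adjacent_sharp_features.lookup n).isSome = true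
instance (surface_idx : Int) (adjacent_sharp_features : List (Int × List Int)) (adjacent_surfaces : List (Int × List Int)) : Decidable (Pre_get_adjacent_features_by_bfs_with_depth1 surface_idx adjacent_sharp_features adjacent_surfaces) := by unfold Pre_get_adjacent_features_by_bfs_with_depth1; infer_instance

def pvWitness_get_adjacent_features_by_bfs_with_depth1 : Int × (List (Int × List Int)) × (List (Int × List Int)) :=
  (0, [(0, [1, 2]), (1, [3])], [(0, [1, 1])])

def Spec_get_adjacent_features_by_bfs_with_depth1 (surface_idx : Int) (adjacent_sharp_features : List (Int × List Int)) (adjacent_surfaces : List (Int × List Int)) (out : List Int) : Prop := out = get_adjacent_features_by_bfs_with_depth1_alt surface_idx adjacent_sharp_features adjacent_surfaces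
instance (surface_idx : Int) (adjacent_sharp_features : List (Int × List Int)) (adjacent_surfaces : List (Int × List Int)) (out : List Int) : Decidable (Spec_get_adjacent_features_by_bfs_with_depth1 surface_idx adjacent_sharp_features adjacent_surfaces out) := by unfold Spec_get_adjacent_features_by_bfs_with_depth1; infer_instance

-- ===== CLAIM (what is proved, stated in full; the proofs are below) =====
def Claim_equal_get_adjacent_features_by_bfs_with_depth1 : Prop := ∀ (surface_idx : Int) (adjacent_sharp_features : List (Int × List Int)) (adjacent_surfaces : List (Int × List Int)), Dom_get_adjacent_features_by_bfs_with_depth1 surface_idx adjacent_sharp_features adjacent_surfaces → Pre_get_adjacent_features_by_bfs_with_depth1 surface_idx adjacent_sharp_features adjacent_surfaces → Spec_get_adjacent_features_by_bfs_with_depth1 surface_idx adjacent_sharp_features adjacent_surfaces (get_adjacent_features_by_bfs_with_depth1 surface_idx adjacent_sharp_features adjacent_surfaces)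

-- ===== LEMMAS AND PROOFS =====

-- ===== VERDICT (by name: the statement is the Claim_ definition above) =====
theorem get_adjacent_features_by_bfs_with_depth1_spec : Claim_equal_get_adjacent_features_by_bfs_with_depth1 := by
  intro si feats surfs _ _
  unfold Spec_get_adjacent_features_by_bfs_with_depth1
  unfold get_adjacent_features_by_bfs_with_depth1 get_adjacent_features_by_bfs_with_depth1_alt
  show pvARec 2 si feats surfs = _
  simp [pvARec, List.lookup, List.flatMap_def]
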